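-- pv_equiv track=rewrite | github.com/clupasq/tuenti21 | 12/solution.py | solution
-- ===== SOURCE A (Python) =====
-- from collections import deque, defaultdict
--
-- def can_reach_btc(coin, exchanges):
--     seen = set()
--     todo = deque([coin])
--     while len(todo) > 0:
--         crt = todo.popleft()
--         if crt == "BTC":
--             return True
--         seen.add(crt)
--         if crt not in exchanges:
--             continue
--         for cc in exchanges[crt]:
--             if cc not in seen:
--                 todo.append(cc)
--     return False
--
-- def find_deadends(exchanges):
--     deadends = set()
--     for c in exchanges:
--         if c == "BTC":
--             continue
--         if not can_reach_btc(c, exchanges):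
--             deadends.add(c)
--     return deadends
--
-- def solution(exchanges):
--     deadends = find_deadends(exchanges)
--     if all([q <= 1 for x in exchanges.values() for q in x.values()]):
--         return 1
--     best_by_coin = defaultdict(int)
--     todo = deque([("BTC", 1)])
--
--     while len(todo) > 0:
--         coin, qty = todo.popleft()
--         if best_by_coin[coin] >= qty:
--             continue
--         best_by_coin[coin] = qty
--         if coin not in exchanges:
--             continue
--         if "BTC" in exchanges[coin]:
--             q = exchanges[coin]["BTC"] * qty
--             if q > 1:
--                 return q
--         for other_coin, ex in exchanges[coin].items():
--             if other_coin in deadends: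
--                 continue
--             qq = ex * qty
--             if best_by_coin[qq] >= qq:
--                 continue
--             todo.append((other_coin, qq))
--     return 1
-- ===== SOURCE B (Python) =====
-- from collections import deque
--
-- def solution(exchanges):
--     # Coins that can reach BTC: one reverse BFS over a predecessor map,
--     # instead of a forward search from every coin.
--     preds = {}
--     for c, outs in exchanges.items():
--         for cc in outs:
--             preds.setdefault(cc, []).append(c)
--     reach = {"BTC"}
--     stack = ["BTC"]
--     while stack:
--         v = stack.pop()
--         for p in preds.get(v, []):
--             if p not in reach:
--                 reach.add(p)
--                 stack.append(p)
--     dead = set(exchanges) - reach  # listed coins that cannot reach BTC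
--
--     top = 0
--     for row in exchanges.values():
--         for q in row.values():
--             top = max(top, q)
--     if top <= 1:
--         return 1
--
--     best = {}
--     todo = deque([("BTC", 1)])
--     while todo:
--         coin, qty = todo.popleft()
--         if qty > best.get(coin, 0):
--             best[coin] = qty
--             for oc, rate in exchanges.get(coin, {}).items():
--                 if oc == "BTC" and rate * qty > 1:
--                     return rate * qty
--                 if oc not in dead:
--                     todo.append((oc, rate * qty))
--     return 1
-- ===== Notes on version B (the rewrite author's own statement) =====
-- stated objective: faster
-- what changed: A decides 'can this coin reach BTC' with a separate forward BFS from every key; B builds a predecessor map once and finds all coins that can reach BTC with a single reverse BFS from BTC, takes the dead set as keys-minus-reachable, replaces the all()-prescan by a running max, and folds the BTC pay-off test into the single pass over a coin's rates without A's accidental mixed-key positivity filter.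
import Mathlib
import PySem

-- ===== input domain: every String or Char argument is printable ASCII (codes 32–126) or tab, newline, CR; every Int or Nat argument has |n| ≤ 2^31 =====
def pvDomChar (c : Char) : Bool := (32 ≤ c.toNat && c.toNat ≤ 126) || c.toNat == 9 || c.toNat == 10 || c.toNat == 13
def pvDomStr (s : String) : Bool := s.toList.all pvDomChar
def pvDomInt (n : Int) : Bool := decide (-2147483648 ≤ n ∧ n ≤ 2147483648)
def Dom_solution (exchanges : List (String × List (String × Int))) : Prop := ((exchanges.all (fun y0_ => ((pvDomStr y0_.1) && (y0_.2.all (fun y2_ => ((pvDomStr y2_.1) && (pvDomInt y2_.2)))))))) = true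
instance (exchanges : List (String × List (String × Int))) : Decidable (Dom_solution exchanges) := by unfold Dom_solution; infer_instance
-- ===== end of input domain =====

-- B replaces A's per-coin forward BFS for "which coins can reach BTC" (a BFS from every key) by ONE
-- reverse BFS from "BTC" over a predecessor map, takes the dead set as keys-minus-reachable, and
-- folds the BTC pay-off test into the single pass over a coin's rates.
-- Equivalence is about the RETURN value (neither Python mutates its argument).

-- ===== PORT A =====
-- Both Pythons receive the dict-of-dicts the harness builds from the association list.
def pvToDict (exchanges : List (String × List (String × Int))) : PySem.Dict String (PySem.Dict String Int) :=
  PySem.Dict.ofList (exchanges.map (fun p => (p.1, PySem.Dict.ofList p.2)))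

-- all coin names occurring in the dict (only a bound for the termination measures of the BFS loops)
def pvUniv (d : PySem.Dict String (PySem.Dict String Int)) : List String :=
  d.keys ++ d.values.flatMap PySem.Dict.keys

-- the two termination-measure facts the BFS loops cite
theorem pv_filter_not_contains_lt {U seen : List String} {c : String}
    (hcU : c ∈ U) (hc : PySem.Set.contains seen c = false) :
    (U.filter (fun x => !(PySem.Set.contains (PySem.Set.add seen c) x))).length
      < (U.filter (fun x => !(PySem.Set.contains seen x))).length := by
  have hcs : c ∉ seen := by simpa [PySem.Set.contains] using hc
  have hadd : PySem.Set.add seen c = seen ++ [c] := by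
    simp [PySem.Set.add]; exact hcs
  rw [hadd]
  have h1 : U.filter (fun x => !(PySem.Set.contains (seen ++ [c]) x))
      = (U.filter (fun x => !(PySem.Set.contains seen x))).filter (fun x => !(x == c)) := by
    rw [List.filter_filter]
    apply List.filter_congr
    intro x _
    simp [PySem.Set.contains, Bool.beq_eq_decide_eq, Bool.and_comm]
  rw [h1]
  apply List.length_filter_lt_length_iff_exists.2
  exact ⟨c, List.mem_filter.2 ⟨hcU, by simpa [PySem.Set.contains] using hcs⟩, by simp⟩

theorem pv_mem_univ_of_get? {d : PySem.Dict String (PySem.Dict String Int)} {crt : String}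
    {outs : PySem.Dict String Int} (h : d.get? crt = some outs) :
    ∀ cc ∈ outs.keys, cc ∈ pvUniv d := by
  intro cc hcc
  have hmem : outs ∈ d.values := by
    simp only [PySem.Dict.get?] at h
    rcases Option.map_eq_some_iff.1 h with ⟨pr, hfind, hpr⟩
    have := List.mem_of_find?_eq_some hfind
    exact hpr ▸ List.mem_map_of_mem this
  exact List.mem_append.2 (Or.inr (List.mem_flatMap.2 ⟨outs, hmem, hcc⟩))

-- port of can_reach_btc: forward BFS from `coin`; `seen.add` happens on pop, pushes filter on `seen`
def canReachGo (d : PySem.Dict String (PySem.Dict String Int)) (U : List String)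
    (hsub : ∀ k outs, d.get? k = some outs → ∀ cc ∈ outs.keys, cc ∈ U)
    (todo : List String) (seen : PySem.Set String) (hU : ∀ x ∈ todo, x ∈ U) : Bool :=
  match todo with
  | [] => false
  | crt :: rest =>
    if crt == "BTC" then true
    else
      let seen' := PySem.Set.add seen crt
      match hg : d.get? crt with
      | none => canReachGo d U hsub rest seen' (fun x hx => hU x (List.mem_cons_of_mem _ hx))
      | some outs =>
          canReachGo d U hsub
            (outs.keys.foldl (fun td cc => if !(PySem.Set.contains seen' cc) then td ++ [cc] else td) rest)
            seen'
            (by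
              intro x hx
              rw [PySem.List.foldl_append_if_eq_filter] at hx
              rcases List.mem_append.1 hx with hx | hx
              · exact hU x (List.mem_cons_of_mem _ hx)
              · exact hsub crt outs hg x (List.mem_of_mem_filter hx))
  termination_by ((U.filter (fun x => !(PySem.Set.contains seen x))).length,
                  (todo.filter (fun x => PySem.Set.contains seen x)).length)
  decreasing_by
  · rcases hc : PySem.Set.contains seen crt with _ | _
    · exact Prod.Lex.left _ _ (pv_filter_not_contains_lt (hU crt (List.mem_cons_self ..)) hc)
    · have hadd : PySem.Set.add seen crt = seen := by simp [PySem.Set.add]; simpa [PySem.Set.contains] using hc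
      rw [hadd]
      refine Prod.Lex.right _ ?_
      rw [List.filter_cons_of_pos hc, List.length_cons]
      exact Nat.lt_succ_self _
  · rcases hc : PySem.Set.contains seen crt with _ | _
    · exact Prod.Lex.left _ _ (pv_filter_not_contains_lt (hU crt (List.mem_cons_self ..)) hc)
    · have hadd : PySem.Set.add seen crt = seen := by simp [PySem.Set.add]; simpa [PySem.Set.contains] using hc
      simp only [dite_eq_ite]
      simp only [hadd]
      refine Prod.Lex.right _ ?_
      rw [PySem.List.foldl_append_if_eq_filter]
      rw [List.filter_append, List.filter_cons_of_pos hc]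
      have hnil : List.filter (fun x => PySem.Set.contains seen x)
          (List.filter (fun cc => !(PySem.Set.contains seen cc)) outs.keys) = [] :=
        List.filter_eq_nil_iff.2 (fun x hx => by simpa using (List.mem_filter.1 hx).2)
      rw [hnil, List.append_nil, List.length_cons]
      exact Nat.lt_succ_self _

def canReach (d : PySem.Dict String (PySem.Dict String Int)) (coin : String) : Bool :=
  canReachGo d (coin :: pvUniv d)
    (fun k outs hg cc hcc => List.mem_cons_of_mem _ (pv_mem_univ_of_get? hg cc hcc))
    [coin] PySem.Set.empty
    (by intro x hx; rw [List.mem_singleton] at hx; simp [hx])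

def findDeadends (d : PySem.Dict String (PySem.Dict String Int)) : PySem.Set String :=
  d.keys.foldl
    (fun de c => if c == "BTC" then de else if canReach d c then de else PySem.Set.add de c)
    PySem.Set.empty

-- fuel for the quantity-pumping loop of either port (a port artifact: the Python 'while todo' has
-- no fuel and can diverge; both ports burn one unit of the SAME generous budget per PRODUCTIVE
-- iteration — a popped item that improves best — and return 1 when it is exhausted)
def pvFuel (exchanges : List (String × List (String × Int))) : Nat :=
  let n := exchanges.length + (exchanges.map (fun p => p.2.length)).sum + 2
  n ^ n

-- port of A's while-loop.  `best_by_coin` is a mixed-key defaultdict: string keys hold the best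
-- quantities; the read `best_by_coin[qq] >= qq` uses the INT key qq, which only ever holds the
-- default 0 (assignments use string keys, ints never equal strings), so it is exactly `0 >= qq`,
-- and defaultdict's insert-on-read is unobservable (the dict is never iterated).
def pumpA (d : PySem.Dict String (PySem.Dict String Int)) (dead : PySem.Set String) :
    Nat → List (String × Int) → PySem.Dict String Int → Int
  | 0, _, _ => 1
  | _ + 1, [], _ => 1
  | fuel + 1, (coin, qty) :: rest, best =>
    if best.getD coin 0 ≥ qty then pumpA d dead (fuel + 1) rest best
    else
      let best := best.insert coin qty
      match d.get? coin with
      | none => pumpA d dead fuel rest best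
      | some outs =>
        let push := outs.items.foldl (fun td p =>
            if PySem.Set.contains dead p.1 then td
            else if 0 ≥ p.2 * qty then td
            else td ++ [(p.1, p.2 * qty)]) rest
        match outs.get? "BTC" with
        | some r => if 1 < r * qty then r * qty else pumpA d dead fuel push best
        | none => pumpA d dead fuel push best
  termination_by fuel todo _ => (fuel, todo.length)
  decreasing_by
  all_goals first
    | exact Prod.Lex.right _ (Nat.lt_succ_self _)
    | exact Prod.Lex.left _ _ (Nat.lt_succ_self _)

def solution (exchanges : List (String × List (String × Int))) : Int :=
  let d := pvToDict exchanges
  let dead := findDeadends d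
  if (d.values.flatMap PySem.Dict.values).all (fun q => decide (q ≤ 1)) then 1
  else pumpA d dead (pvFuel exchanges) [("BTC", 1)] PySem.Dict.empty

-- ===== PORT B =====
-- B: predecessor map, built once ('preds.setdefault(cc, []).append(c)' is Dict.modify)
def buildPreds (d : PySem.Dict String (PySem.Dict String Int)) : PySem.Dict String (List String) :=
  d.items.foldl
    (fun pr p => p.2.keys.foldl (fun pr cc => pr.modify cc [] (· ++ [p.1])) pr)
    PySem.Dict.empty

theorem pv_mem_flatMap_values_of_mem_getD {dd : PySem.Dict String (List String)} {k p : String}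
    (h : p ∈ dd.getD k []) : p ∈ dd.items.flatMap (fun q => q.2) := by
  simp only [PySem.Dict.getD] at h
  rcases hg : dd.get? k with _ | l
  · rw [hg] at h; simp at h
  · rw [hg] at h
    simp only [PySem.Dict.get?] at hg
    rcases Option.map_eq_some_iff.1 hg with ⟨pr, hfind, hpr⟩
    have hm := List.mem_of_find?_eq_some hfind
    exact List.mem_flatMap.2 ⟨pr, hm, by simpa [hpr] using h⟩

-- B's inner for-loop over preds[v]: add unseen predecessors to reach and push them
def revPush : List String → PySem.Set String → List String → (PySem.Set String × List String)
  | [], reach, stack => (reach, stack)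
  | p :: ps, reach, stack =>
    if PySem.Set.contains reach p then revPush ps reach stack
    else revPush ps (PySem.Set.add reach p) (p :: stack)

-- measure/invariant facts about revPush (cited by revGo's termination proof)
theorem pv_revPush_le (ps U : List String) (hps : ∀ p ∈ ps, p ∈ U)
    (reach : PySem.Set String) (stack : List String) :
    ((U.filter (fun x => !(PySem.Set.contains (revPush ps reach stack).1 x))).length
        + (revPush ps reach stack).2.length
      ≤ (U.filter (fun x => !(PySem.Set.contains reach x))).length + stack.length)
    ∧ (∀ x ∈ (revPush ps reach stack).2, x ∈ stack ∨ x ∈ ps) := by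
  induction ps generalizing reach stack with
  | nil => exact ⟨le_refl _, fun x hx => Or.inl hx⟩
  | cons p ps ih =>
    have hpU : p ∈ U := hps p (List.mem_cons_self ..)
    have hps' : ∀ q ∈ ps, q ∈ U := fun q hq => hps q (List.mem_cons_of_mem _ hq)
    rcases hcont : PySem.Set.contains reach p with _ | _
    · rw [revPush, if_neg (by rw [hcont]; simp)]
      rcases ih hps' (PySem.Set.add reach p) (p :: stack) with ⟨hle, hmem⟩
      constructor
      · refine hle.trans ?_
        have := pv_filter_not_contains_lt (seen := reach) hpU hcont
        simp only [List.length_cons]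
        omega
      · intro x hx
        rcases hmem x hx with hx' | hx'
        · rcases List.mem_cons.1 hx' with h | h
          · exact Or.inr (h ▸ List.mem_cons_self ..)
          · exact Or.inl h
        · exact Or.inr (List.mem_cons_of_mem _ hx')
    · rw [revPush, if_pos (by rw [hcont])]
      rcases ih hps' reach stack with ⟨hle, hmem⟩
      exact ⟨hle, fun x hx => (hmem x hx).imp id (List.mem_cons_of_mem _)⟩

-- B: one reverse BFS from "BTC" ('stack.pop()' pops the end: LIFO, modelled by pushing at the head)
def revGo (preds : PySem.Dict String (List String)) (U : List String)
    (hp : ∀ k p, p ∈ preds.getD k [] → p ∈ U)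
    (stack : List String) (reach : PySem.Set String)
    (hU : ∀ x ∈ stack, x ∈ U) : PySem.Set String :=
  match stack with
  | [] => reach
  | v :: rest =>
    let st := revPush (preds.getD v []) reach rest
    revGo preds U hp st.2 st.1
      (by
        intro x hx
        rcases (pv_revPush_le (preds.getD v []) U (fun q hq => hp v q hq) reach rest).2 x hx with h | h
        · exact hU x (List.mem_cons_of_mem _ h)
        · exact hp v x h)
  termination_by (U.filter (fun x => !(PySem.Set.contains reach x))).length + stack.length
  decreasing_by
  · have := (pv_revPush_le (preds.getD v []) U (fun q hq => hp v q hq) reach rest).1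
    simp only [List.length_cons]
    omega

def reachBTC (d : PySem.Dict String (PySem.Dict String Int)) : PySem.Set String :=
  revGo (buildPreds d) ("BTC" :: (buildPreds d).items.flatMap (fun q => q.2))
    (fun _ p hp => List.mem_cons_of_mem _ (pv_mem_flatMap_values_of_mem_getD hp))
    ["BTC"] (PySem.Set.ofList ["BTC"])
    (by intro x hx; rw [List.mem_singleton] at hx; simp [hx])

-- B's single pass over one coin's rates: either the BTC pay-off fires (Sum.inl) or it returns the
-- grown todo queue (Sum.inr); `dead` is B's keys-minus-reachable set
def scanB (dead : PySem.Set String) (qty : Int) :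
    List (String × Int) → List (String × Int) → Sum Int (List (String × Int))
  | [], todo => .inr todo
  | (oc, rate) :: rest, todo =>
    if oc == "BTC" && decide (1 < rate * qty) then .inl (rate * qty)
    else if PySem.Set.contains dead oc then scanB dead qty rest todo
    else scanB dead qty rest (todo ++ [(oc, rate * qty)])

def pumpB (d : PySem.Dict String (PySem.Dict String Int)) (dead : PySem.Set String) :
    Nat → List (String × Int) → PySem.Dict String Int → Int
  | 0, _, _ => 1
  | _ + 1, [], _ => 1
  | fuel + 1, (coin, qty) :: rest, best =>
    if qty > best.getD coin 0 then
      match scanB dead qty (d.getD coin PySem.Dict.empty).items rest with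
      | .inl r => r
      | .inr todo' => pumpB d dead fuel todo' (best.insert coin qty)
    else pumpB d dead (fuel + 1) rest best
  termination_by fuel todo _ => (fuel, todo.length)
  decreasing_by
  all_goals first
    | exact Prod.Lex.right _ (Nat.lt_succ_self _)
    | exact Prod.Lex.left _ _ (Nat.lt_succ_self _)

def solution_alt (exchanges : List (String × List (String × Int))) : Int :=
  let d := pvToDict exchanges
  let reach := reachBTC d
  let dead := PySem.Set.diff (PySem.Set.ofList d.keys) reach
  let top := d.values.foldl (fun t row => row.values.foldl (fun t q => max t q) t) 0
  if top ≤ (1 : Int) then 1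
  else pumpB d dead (pvFuel exchanges) [("BTC", 1)] PySem.Dict.empty

-- ===== PRECONDITION & SPEC =====
def Spec_solution (exchanges : List (String × List (String × Int))) (out : Int) : Prop := out = solution_alt exchanges
instance (exchanges : List (String × List (String × Int))) (out : Int) : Decidable (Spec_solution exchanges out) := by unfold Spec_solution; infer_instance

-- ===== CLAIM (what is proved, stated in full; the proofs are below) =====
def Claim_equal_solution : Prop := ∀ (exchanges : List (String × List (String × Int))), Dom_solution exchanges → Spec_solution exchanges (solution exchanges)

-- ===== LEMMAS AND PROOFS =====

-- the edge relation of the exchange graph ("cc in exchanges[crt]")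
def pvSuccs (d : PySem.Dict String (PySem.Dict String Int)) (a : String) : List String :=
  match d.get? a with
  | none => []
  | some outs => outs.keys

def pvEdge (d : PySem.Dict String (PySem.Dict String Int)) (a b : String) : Prop :=
  b ∈ pvSuccs d a

def pvReach (d : PySem.Dict String (PySem.Dict String Int)) (a : String) : Prop :=
  Relation.ReflTransGen (pvEdge d) a "BTC"

-- a successor-closed set avoiding "BTC" contains no coin that reaches "BTC"
theorem pv_closed_not_reach {d : PySem.Dict String (PySem.Dict String Int)} {S : List String}
    (hB : "BTC" ∉ S) (hcl : ∀ s ∈ S, ∀ w, pvEdge d s w → w ∈ S) :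
    ∀ x ∈ S, ¬ pvReach d x := by
  intro x hx hr
  unfold pvReach at hr
  induction hr using Relation.ReflTransGen.head_induction_on with
  | refl => exact hB hx
  | head hstep _ ih => exact ih (hcl _ hx _ hstep)

-- soundness of the forward BFS: a `true` answer exhibits a path
theorem pv_canReachGo_true {d : PySem.Dict String (PySem.Dict String Int)} {U : List String}
    {hsub : ∀ k outs, d.get? k = some outs → ∀ cc ∈ outs.keys, cc ∈ U}
    (todo : List String) (seen : PySem.Set String) (hU : ∀ x ∈ todo, x ∈ U) :
    canReachGo d U hsub todo seen hU = true → ∃ x ∈ todo, pvReach d x := by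
  fun_induction canReachGo d U hsub todo seen hU with
  | case1 seen hU1 hU2 => intro h; simp at h
  | case2 seen crt rest hU1 hbtc hU2 =>
    intro _
    refine ⟨crt, List.mem_cons_self .., ?_⟩
    have : crt = "BTC" := by simpa using hbtc
    exact this ▸ Relation.ReflTransGen.refl
  | case3 seen crt rest hU1 hbtc seen' hg hU2 ih =>
    intro h
    rcases ih h with ⟨x, hx, hr⟩
    exact ⟨x, List.mem_cons_of_mem _ hx, hr⟩
  | case4 seen crt rest hU1 hbtc seen' outs hg hU2 ih =>
    intro h
    rcases ih h with ⟨x, hx, hr⟩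
    simp only [dite_eq_ite] at hx
    rw [PySem.List.foldl_append_if_eq_filter] at hx
    rcases List.mem_append.1 hx with hx | hx
    · exact ⟨x, List.mem_cons_of_mem _ hx, hr⟩
    · refine ⟨crt, List.mem_cons_self .., Relation.ReflTransGen.head ?_ hr⟩
      show x ∈ pvSuccs d crt
      simp only [pvSuccs, hg]
      exact List.mem_of_mem_filter hx

-- completeness of the forward BFS: a `false` answer means no path from anything queued or seen
theorem pv_canReachGo_false {d : PySem.Dict String (PySem.Dict String Int)} {U : List String}
    {hsub : ∀ k outs, d.get? k = some outs → ∀ cc ∈ outs.keys, cc ∈ U}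
    (todo : List String) (seen : PySem.Set String) (hU : ∀ x ∈ todo, x ∈ U) :
    canReachGo d U hsub todo seen hU = false →
    "BTC" ∉ seen → (∀ s ∈ seen, ∀ w, pvEdge d s w → w ∈ seen ∨ w ∈ todo) →
    ∀ x, (x ∈ todo ∨ x ∈ seen) → ¬ pvReach d x := by
  fun_induction canReachGo d U hsub todo seen hU with
  | case1 seen hU1 hU2 =>
    intro _ hB hcl x hx
    rcases hx with hx | hx
    · simp at hx
    · exact pv_closed_not_reach hB
        (fun s hs w hw => (hcl s hs w hw).resolve_right (by simp)) x hx
  | case2 seen crt rest hU1 hbtc hU2 => intro h; simp at h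
  | case3 seen crt rest hU1 hbtc seen' hg hU2 ih =>
    intro h hB hcl
    have hcrtB : crt ≠ "BTC" := by simpa using hbtc
    have hB' : "BTC" ∉ PySem.Set.add seen crt := by
      rw [PySem.Set.mem_add]
      rintro (h' | h')
      · exact hB h'
      · exact hcrtB h'.symm
    have hcl' : ∀ s ∈ PySem.Set.add seen crt, ∀ w, pvEdge d s w →
        w ∈ PySem.Set.add seen crt ∨ w ∈ rest := by
      intro s hs w hw
      rcases (PySem.Set.mem_add seen crt s).1 hs with hs | hs
      · rcases hcl s hs w hw with h' | h'
        · exact Or.inl ((PySem.Set.mem_add seen crt w).2 (Or.inl h'))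
        · rcases List.mem_cons.1 h' with h' | h'
          · exact Or.inl ((PySem.Set.mem_add seen crt w).2 (Or.inr h'))
          · exact Or.inr h'
      · subst hs
        unfold pvEdge pvSuccs at hw
        rw [hg] at hw
        simp at hw
    have ih' := ih h hB' hcl'
    intro x hx
    rcases hx with hx | hx
    · rcases List.mem_cons.1 hx with hx | hx
      · exact ih' x (Or.inr ((PySem.Set.mem_add seen crt x).2 (Or.inr hx)))
      · exact ih' x (Or.inl hx)
    · exact ih' x (Or.inr ((PySem.Set.mem_add seen crt x).2 (Or.inl hx)))
  | case4 seen crt rest hU1 hbtc seen' outs hg hU2 ih =>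
    intro h hB hcl
    have hcrtB : crt ≠ "BTC" := by simpa using hbtc
    have hB' : "BTC" ∉ PySem.Set.add seen crt := by
      rw [PySem.Set.mem_add]
      rintro (h' | h')
      · exact hB h'
      · exact hcrtB h'.symm
    have hpush : ∀ w, (w ∈ outs.keys.foldl (fun td cc =>
          if h : (!(PySem.Set.contains (PySem.Set.add seen crt) cc)) = true then td ++ [cc] else td) rest)
        ↔ w ∈ rest ∨ w ∈ outs.keys.filter (fun cc => !(PySem.Set.contains (PySem.Set.add seen crt) cc)) := by
      intro w
      simp only [dite_eq_ite]
      rw [PySem.List.foldl_append_if_eq_filter]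
      exact List.mem_append
    have hcl' : ∀ s ∈ PySem.Set.add seen crt, ∀ w, pvEdge d s w →
        w ∈ PySem.Set.add seen crt ∨
          w ∈ outs.keys.foldl (fun td cc =>
            if h : (!(PySem.Set.contains (PySem.Set.add seen crt) cc)) = true then td ++ [cc] else td) rest := by
      intro s hs w hw
      rcases (PySem.Set.mem_add seen crt s).1 hs with hs | hs
      · rcases hcl s hs w hw with h' | h'
        · exact Or.inl ((PySem.Set.mem_add seen crt w).2 (Or.inl h'))
        · rcases List.mem_cons.1 h' with h' | h'
          · exact Or.inl ((PySem.Set.mem_add seen crt w).2 (Or.inr h'))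
          · exact Or.inr ((hpush w).2 (Or.inl h'))
      · subst hs
        unfold pvEdge pvSuccs at hw
        rw [hg] at hw
        rcases hcont : PySem.Set.contains (PySem.Set.add seen s) w with _ | _
        · exact Or.inr ((hpush w).2 (Or.inr (List.mem_filter.2 ⟨hw, by rw [hcont]; rfl⟩)))
        · exact Or.inl (by simpa [PySem.Set.contains] using hcont)
    have ih' := ih h hB' hcl'
    intro x hx
    rcases hx with hx | hx
    · rcases List.mem_cons.1 hx with hx | hx
      · exact ih' x (Or.inr ((PySem.Set.mem_add seen crt x).2 (Or.inr hx)))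
      · exact ih' x (Or.inl ((hpush x).2 (Or.inl hx)))
    · exact ih' x (Or.inr ((PySem.Set.mem_add seen crt x).2 (Or.inl hx)))

theorem pv_canReach_iff (d : PySem.Dict String (PySem.Dict String Int)) (c : String) :
    canReach d c = true ↔ pvReach d c := by
  constructor
  · intro h
    rcases pv_canReachGo_true _ _ _ h with ⟨x, hx, hr⟩
    rw [List.mem_singleton] at hx
    exact hx ▸ hr
  · intro hr
    rcases hcr : canReach d c with _ | _
    · exact absurd hr (pv_canReachGo_false _ _ _ hcr (by simp [PySem.Set.empty])
        (by simp [PySem.Set.empty]) c (Or.inl (List.mem_singleton.2 rfl)))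
    · rfl

-- remaining facts about revPush (the measure facts are in pv_revPush_le, above the port)
theorem pv_revPush_facts (ps : List String) (reach : PySem.Set String) (stack : List String) :
    (∀ x ∈ reach, x ∈ (revPush ps reach stack).1)
    ∧ (∀ x ∈ stack, x ∈ (revPush ps reach stack).2)
    ∧ (∀ x ∈ (revPush ps reach stack).1, x ∈ reach ∨ x ∈ ps)
    ∧ (∀ x ∈ (revPush ps reach stack).2, x ∈ stack ∨ x ∈ (revPush ps reach stack).1)
    ∧ (∀ p ∈ ps, p ∈ (revPush ps reach stack).1)
    ∧ (∀ x ∈ (revPush ps reach stack).1, x ∈ reach ∨ x ∈ (revPush ps reach stack).2) := by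
  induction ps generalizing reach stack with
  | nil =>
    refine ⟨fun x hx => hx, fun x hx => hx, fun x hx => Or.inl hx,
      fun x hx => Or.inl hx, by simp, fun x hx => Or.inl hx⟩
  | cons p ps ih =>
    rcases hcont : PySem.Set.contains reach p with _ | _
    · rw [revPush, if_neg (by rw [hcont]; simp)]
      rcases ih (PySem.Set.add reach p) (p :: stack) with ⟨a1, a2, a3, a4, a5, a6⟩
      have hpadd : p ∈ PySem.Set.add reach p := (PySem.Set.mem_add reach p p).2 (Or.inr rfl)
      refine ⟨?_, ?_, ?_, ?_, ?_, ?_⟩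
      · exact fun x hx => a1 x ((PySem.Set.mem_add reach p x).2 (Or.inl hx))
      · exact fun x hx => a2 x (List.mem_cons_of_mem _ hx)
      · intro x hx
        rcases a3 x hx with h | h
        · rcases (PySem.Set.mem_add reach p x).1 h with h | h
          · exact Or.inl h
          · exact Or.inr (h ▸ List.mem_cons_self ..)
        · exact Or.inr (List.mem_cons_of_mem _ h)
      · intro x hx
        rcases a4 x hx with h | h
        · rcases List.mem_cons.1 h with h | h
          · exact Or.inr (h ▸ a1 p hpadd)
          · exact Or.inl h
        · exact Or.inr h
      · intro q hq
        rcases List.mem_cons.1 hq with h | h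
        · exact h ▸ a1 p hpadd
        · exact a5 q h
      · intro x hx
        rcases a6 x hx with h | h
        · rcases (PySem.Set.mem_add reach p x).1 h with h | h
          · exact Or.inl h
          · exact Or.inr (h ▸ a2 p (List.mem_cons_self ..))
        · exact Or.inr h
    · rw [revPush, if_pos (by rw [hcont])]
      rcases ih reach stack with ⟨a1, a2, a3, a4, a5, a6⟩
      refine ⟨a1, a2, fun x hx => (a3 x hx).imp id (List.mem_cons_of_mem _), a4, ?_, a6⟩
      intro q hq
      rcases List.mem_cons.1 hq with h | h
      · exact h ▸ a1 p (by simpa [PySem.Set.contains] using hcont)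
      · exact a5 q h

-- soundness of the reverse BFS: everything collected is backward-reachable from "BTC"
theorem pv_revGo_sound {d : PySem.Dict String (PySem.Dict String Int)}
    {preds : PySem.Dict String (List String)} {U : List String}
    {hp : ∀ k p, p ∈ preds.getD k [] → p ∈ U}
    (hpred : ∀ k p, p ∈ preds.getD k [] → pvEdge d p k)
    (stack : List String) (reach : PySem.Set String) (hU : ∀ x ∈ stack, x ∈ U) :
    (∀ x ∈ reach, Relation.ReflTransGen (Function.swap (pvEdge d)) "BTC" x) →
    (∀ x ∈ stack, Relation.ReflTransGen (Function.swap (pvEdge d)) "BTC" x) →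
    ∀ x ∈ revGo preds U hp stack reach hU, Relation.ReflTransGen (Function.swap (pvEdge d)) "BTC" x := by
  fun_induction revGo preds U hp stack reach hU with
  | case1 reach hU1 hU2 =>
    intro hr _
    exact hr
  | case2 reach v rest hU1 st hU2 ih =>
    intro hr hs
    rcases pv_revPush_facts (preds.getD v []) reach rest with ⟨a1, a2, a3, a4, a5, a6⟩
    have hv := hs v (List.mem_cons_self ..)
    refine ih ?_ ?_
    · intro x hx
      rcases a3 x hx with h | h
      · exact hr x h
      · exact Relation.ReflTransGen.tail hv (hpred v x h)
    · intro x hx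
      rcases (pv_revPush_le (preds.getD v []) U (fun q hq => hp v q hq) reach rest).2 x hx with h | h
      · exact hs x (List.mem_cons_of_mem _ h)
      · exact Relation.ReflTransGen.tail hv (hpred v x h)

-- completeness of the reverse BFS: the result is predecessor-closed and contains the start set
theorem pv_revGo_complete {preds : PySem.Dict String (List String)} {U : List String}
    {hp : ∀ k p, p ∈ preds.getD k [] → p ∈ U}
    (stack : List String) (reach : PySem.Set String) (hU : ∀ x ∈ stack, x ∈ U) :
    (∀ x ∈ stack, x ∈ reach) →
    (∀ s ∈ reach, s ∈ stack ∨ ∀ p ∈ preds.getD s [], p ∈ reach) →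
    (∀ x ∈ reach, x ∈ revGo preds U hp stack reach hU)
    ∧ (∀ s ∈ revGo preds U hp stack reach hU, ∀ p ∈ preds.getD s [],
        p ∈ revGo preds U hp stack reach hU) := by
  fun_induction revGo preds U hp stack reach hU with
  | case1 reach hU1 hU2 =>
    intro _ hinv
    refine ⟨fun x hx => hx, fun s hs p hps => ?_⟩
    rcases hinv s hs with h | h
    · simp at h
    · exact h p hps
  | case2 reach v rest hU1 st hU2 ih =>
    intro hsub hinv
    rcases pv_revPush_facts (preds.getD v []) reach rest with ⟨a1, a2, a3, a4, a5, a6⟩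
    have hsub' : ∀ x ∈ st.2, x ∈ st.1 := by
      intro x hx
      rcases a4 x hx with h | h
      · exact a1 x (hsub x (List.mem_cons_of_mem _ h))
      · exact h
    have hinv' : ∀ s ∈ st.1, s ∈ st.2 ∨ ∀ p ∈ preds.getD s [], p ∈ st.1 := by
      intro s hsst
      rcases a6 s hsst with h | h
      · rcases hinv s h with h' | h'
        · rcases List.mem_cons.1 h' with h' | h'
          · subst h'
            exact Or.inr (fun p hps => a5 p hps)
          · exact Or.inl (a2 s h')
        · exact Or.inr (fun p hps => a1 p (h' p hps))
      · exact Or.inl h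
    rcases ih hsub' hinv' with ⟨c1, c2⟩
    exact ⟨fun x hx => c1 x (a1 x hx), c2⟩

-- characterisation of the predecessor map built by B
theorem pv_buildPreds_getD (d : PySem.Dict String (PySem.Dict String Int)) (w : String) :
    (buildPreds d).getD w [] =
      ((d.items.flatMap (fun p => p.2.keys.map (fun cc => (cc, p.1)))).filter
        (fun q => q.1 == w)).map (fun q => q.2) := by
  unfold buildPreds
  have h2 : d.items.foldl (fun pr p => p.2.keys.foldl (fun pr cc => pr.modify cc [] (· ++ [p.1])) pr)
        PySem.Dict.empty
      = (d.items.flatMap (fun p => p.2.keys.map (fun cc => (cc, p.1)))).foldl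
          (fun pr q => pr.modify q.1 [] (· ++ [q.2])) PySem.Dict.empty := by
    rw [List.foldl_flatMap]
    refine PySem.List.foldl_congr_mem _ _ _ _ ?_
    intro acc p _
    rw [List.foldl_map]
  rw [h2, PySem.Dict.getD_foldl_modify_append]
  simp [PySem.Dict.getD, PySem.Dict.get?, PySem.Dict.empty]

theorem pv_mem_buildPreds_iff {d : PySem.Dict String (PySem.Dict String Int)}
    (hn : d.keys.Nodup) (p w : String) :
    p ∈ (buildPreds d).getD w [] ↔ pvEdge d p w := by
  rw [pv_buildPreds_getD]
  simp only [List.mem_map, List.mem_filter, List.mem_flatMap]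
  constructor
  · rintro ⟨q, ⟨⟨item, hitem, hq⟩, hqw⟩, hqp⟩
    rcases hq with ⟨cc, hcc, hccq⟩
    have hget : d.get? item.1 = some item.2 :=
      (PySem.Dict.get?_eq_some_iff_mem_items _ _ _ hn).2 (by simpa using hitem)
    have hq1 : q.1 = w := by simpa using hqw
    have hitem1 : item.1 = p := by rw [← hqp, ← hccq]
    have hccw : cc = w := by rw [← hq1, ← hccq]
    unfold pvEdge pvSuccs
    rw [← hitem1, hget]
    exact hccw ▸ hcc
  · intro h
    unfold pvEdge pvSuccs at h
    rcases hg : d.get? p with _ | outs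
    · rw [hg] at h; simp at h
    · rw [hg] at h
      have hitem : (p, outs) ∈ d.items := (PySem.Dict.get?_eq_some_iff_mem_items _ _ _ hn).1 hg
      exact ⟨(w, p), ⟨⟨(p, outs), hitem, ⟨w, h, rfl⟩⟩, by simp⟩, rfl⟩

-- membership in B's reach set is exactly "can reach BTC"
theorem pv_mem_reachBTC_iff {d : PySem.Dict String (PySem.Dict String Int)}
    (hn : d.keys.Nodup) (x : String) :
    x ∈ reachBTC d ↔ pvReach d x := by
  have hpred : ∀ k p, p ∈ (buildPreds d).getD k [] → pvEdge d p k :=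
    fun k p h => (pv_mem_buildPreds_iff hn p k).1 h
  constructor
  · intro hx
    unfold reachBTC at hx
    have hs := pv_revGo_sound (d := d) (preds := buildPreds d)
      (U := "BTC" :: (buildPreds d).items.flatMap (fun q => q.2))
      (hp := fun _ p hp => List.mem_cons_of_mem _ (pv_mem_flatMap_values_of_mem_getD hp))
      hpred ["BTC"] (PySem.Set.ofList ["BTC"])
      (by intro y hy; rw [List.mem_singleton] at hy; simp [hy])
      (fun y hy => by
        have : y = "BTC" := List.mem_singleton.1 hy
        exact this ▸ Relation.ReflTransGen.refl)
      (fun y hy => by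
        have : y = "BTC" := List.mem_singleton.1 hy
        exact this ▸ Relation.ReflTransGen.refl)
      x hx
    exact Relation.reflTransGen_swap.1 hs
  · intro hr
    rcases pv_revGo_complete (preds := buildPreds d)
      (U := "BTC" :: (buildPreds d).items.flatMap (fun q => q.2))
      (hp := fun _ p hp => List.mem_cons_of_mem _ (pv_mem_flatMap_values_of_mem_getD hp))
      ["BTC"] (PySem.Set.ofList ["BTC"])
      (by intro y hy; rw [List.mem_singleton] at hy; simp [hy])
      (fun y hy => List.mem_singleton.1 hy ▸ List.mem_singleton.2 rfl)
      (fun s hs => Or.inl (List.mem_singleton.2 (List.mem_singleton.1 hs)))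
      with ⟨c1, c2⟩
    unfold reachBTC
    have hBTC := c1 "BTC" (List.mem_singleton.2 rfl)
    have hswap : Relation.ReflTransGen (Function.swap (pvEdge d)) "BTC" x :=
      Relation.reflTransGen_swap.2 hr
    clear hr
    induction hswap with
    | refl => exact hBTC
    | tail hab hbc ih =>
      exact c2 _ ih _ ((pv_mem_buildPreds_iff hn _ _).2 hbc)

-- membership in A's deadend set
theorem pv_mem_findDeadends_iff (d : PySem.Dict String (PySem.Dict String Int)) (x : String) :
    x ∈ findDeadends d ↔ x ∈ d.keys ∧ x ≠ "BTC" ∧ canReach d x = false := by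
  unfold findDeadends
  suffices h : ∀ (l : List String) (acc : PySem.Set String),
      x ∈ l.foldl (fun de c => if c == "BTC" then de else if canReach d c then de else PySem.Set.add de c) acc
        ↔ x ∈ acc ∨ (x ∈ l ∧ x ≠ "BTC" ∧ canReach d x = false) by
    rw [h]
    simp [PySem.Set.empty]
  intro l
  induction l with
  | nil => intro acc; simp
  | cons c l ih =>
    intro acc
    rw [List.foldl_cons]
    rcases hb : (c == "BTC") with _ | _
    · rcases hcr : canReach d c with _ | _
      · rw [if_neg (by simp), if_neg (by simp), ih]
        constructor
        · rintro (h | h)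
          · rcases (PySem.Set.mem_add acc c x).1 h with h | h
            · exact Or.inl h
            · subst h
              exact Or.inr ⟨List.mem_cons_self .., by simpa using hb, hcr⟩
          · exact Or.inr ⟨List.mem_cons_of_mem _ h.1, h.2⟩
        · rintro (h | ⟨h1, h2, h3⟩)
          · exact Or.inl ((PySem.Set.mem_add acc c x).2 (Or.inl h))
          · rcases List.mem_cons.1 h1 with h1 | h1
            · exact Or.inl ((PySem.Set.mem_add acc c x).2 (Or.inr h1))
            · exact Or.inr ⟨h1, h2, h3⟩
      · rw [if_neg (by simp), if_pos rfl, ih]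
        constructor
        · rintro (h | h)
          · exact Or.inl h
          · exact Or.inr ⟨List.mem_cons_of_mem _ h.1, h.2⟩
        · rintro (h | ⟨h1, h2, h3⟩)
          · exact Or.inl h
          · rcases List.mem_cons.1 h1 with h1 | h1
            · rw [h1, hcr] at h3; simp at h3
            · exact Or.inr ⟨h1, h2, h3⟩
    · rw [if_pos rfl, ih]
      constructor
      · rintro (h | h)
        · exact Or.inl h
        · exact Or.inr ⟨List.mem_cons_of_mem _ h.1, h.2⟩
      · rintro (h | ⟨h1, h2, h3⟩)
        · exact Or.inl h
        · rcases List.mem_cons.1 h1 with h1 | h1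
          · exact absurd (h1.trans (by simpa using hb)) h2
          · exact Or.inr ⟨h1, h2, h3⟩

-- A's deadend set and B's keys-minus-reachable set agree as membership tests
theorem pv_dead_eq {d : PySem.Dict String (PySem.Dict String Int)}
    (hn : d.keys.Nodup) (oc : String) :
    PySem.Set.contains (findDeadends d) oc
      = PySem.Set.contains (PySem.Set.diff (PySem.Set.ofList d.keys) (reachBTC d)) oc := by
  rw [Bool.eq_iff_iff, PySem.Set.contains_iff, PySem.Set.contains_iff,
    pv_mem_findDeadends_iff, PySem.Set.mem_diff, PySem.Set.mem_ofList]
  constructor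
  · rintro ⟨hk, hne, hcr⟩
    refine ⟨hk, fun hr => ?_⟩
    have h1 := (pv_mem_reachBTC_iff hn oc).1 hr
    rw [← pv_canReach_iff, hcr] at h1
    exact absurd h1 (by simp)
  · rintro ⟨hk, hnr⟩
    have hB : ("BTC" : String) ∈ reachBTC d :=
      (pv_mem_reachBTC_iff hn _).2 Relation.ReflTransGen.refl
    refine ⟨hk, fun h => hnr (h ▸ hB), ?_⟩
    rcases hcr : canReach d oc with _ | _
    · rfl
    · exact absurd ((pv_mem_reachBTC_iff hn oc).2 ((pv_canReach_iff d oc).1 hcr)) hnr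

-- every inner dict the harness-built dict holds has unique keys
theorem pv_values_foldl_insert_nodup :
    ∀ (l : List (String × PySem.Dict String Int)) (d : PySem.Dict String (PySem.Dict String Int)),
    (∀ v ∈ d.values, v.keys.Nodup) → (∀ p ∈ l, p.2.keys.Nodup) →
    ∀ v ∈ (l.foldl (fun d p => d.insert p.1 p.2) d).values, v.keys.Nodup := by
  intro l
  induction l with
  | nil => intro d hd _ v hv; exact hd v hv
  | cons p l ih =>
    intro d hd hl v hv
    refine ih (d.insert p.1 p.2) ?_ (fun q hq => hl q (List.mem_cons_of_mem _ hq)) v hv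
    intro w hw
    rcases PySem.Dict.mem_values_insert _ _ _ _ hw with h | h
    · exact h ▸ hl p (List.mem_cons_self ..)
    · exact hd w h

theorem pv_toDict_outs_nodup (exchanges : List (String × List (String × Int))) :
    ∀ coin outs, (pvToDict exchanges).get? coin = some outs → outs.keys.Nodup := by
  intro coin outs h
  have hmem : outs ∈ (pvToDict exchanges).values := by
    have hit := PySem.Dict.mem_items_of_get?_eq_some _ h
    simp only [PySem.Dict.values]
    exact List.mem_map_of_mem hit
  have hrw : pvToDict exchanges
      = (exchanges.map (fun p => (p.1, PySem.Dict.ofList p.2))).foldl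
          (fun d p => d.insert p.1 p.2) PySem.Dict.empty := rfl
  rw [hrw] at hmem
  refine pv_values_foldl_insert_nodup _ _ ?_ ?_ outs hmem
  · intro v hv
    simp [PySem.Dict.empty, PySem.Dict.values] at hv
  · intro v hv
    rcases List.mem_map.1 hv with ⟨p, _, hp⟩
    exact hp ▸ PySem.Dict.nodup_keys_ofList p.2

-- B's scan returns the pay-off as soon as the (unique) BTC rate pays
theorem pv_scan_inl (dead : PySem.Set String) (qty r : Int) (k : String) :
    ∀ (items todo : List (String × Int)),
    items.find? (fun p => p.1 == "BTC") = some (k, r) → 1 < r * qty →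
    scanB dead qty items todo = .inl (r * qty) := by
  intro items
  induction items with
  | nil => intro todo h _; simp at h
  | cons p rest ih =>
    intro todo h hlt
    obtain ⟨oc, rate⟩ := p
    by_cases hb : (oc == "BTC") = true
    · rw [List.find?_cons_of_pos (by simpa using hb)] at h
      rcases Prod.mk.injEq .. ▸ Option.some.inj h with ⟨hk, hr⟩
      rw [scanB, if_pos (by rw [hb, hr]; simpa using hlt)]
      rw [hr]
    · rw [List.find?_cons_of_neg (by simpa using hb)] at h
      rw [scanB, if_neg (by simp [hb])]
      split
      · exact ih todo h hlt
      · exact ih _ h hlt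

-- when no BTC rate pays, B's scan returns the todo queue grown by the live rates
theorem pv_scan_inr (dead : PySem.Set String) (qty : Int) :
    ∀ (items todo : List (String × Int)),
    (∀ p ∈ items, p.1 = "BTC" → ¬(1 < p.2 * qty)) →
    scanB dead qty items todo
      = .inr (todo ++ (items.filter (fun p => !(PySem.Set.contains dead p.1))).map
          (fun p => (p.1, p.2 * qty))) := by
  intro items
  induction items with
  | nil => intro todo _; simp [scanB]
  | cons p rest ih =>
    intro todo h
    obtain ⟨oc, rate⟩ := p
    have h1 : (oc == "BTC" && decide (1 < rate * qty)) = false := by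
      by_cases hb : oc = "BTC"
      · have := h (oc, rate) (List.mem_cons_self ..) hb
        simp [this]
      · simp [hb]
    rw [scanB, if_neg (by simp [h1])]
    have hrest : ∀ p ∈ rest, p.1 = "BTC" → ¬(1 < p.2 * qty) :=
      fun p hp => h p (List.mem_cons_of_mem _ hp)
    rcases hc : PySem.Set.contains dead oc with _ | _
    · have hc' : oc ∉ dead := by simpa [PySem.Set.contains] using hc
      rw [if_neg (by simp), ih _ hrest]
      simp [hc']
    · have hc' : oc ∈ dead := by simpa [PySem.Set.contains] using hc
      rw [if_pos rfl, ih _ hrest]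
      simp [hc']

-- a running max over Int stays ≤ 1 exactly when the start and every element are ≤ 1
theorem pv_foldl_max_le_one :
    ∀ (l : List Int) (a : Int),
    (l.foldl (fun t q => max t q) a ≤ 1 ↔ a ≤ 1 ∧ l.all (fun q => decide (q ≤ 1)) = true) := by
  intro l
  induction l with
  | nil => intro a; simp
  | cons q l ih =>
    intro a
    rw [List.foldl_cons, ih, List.all_cons]
    simp only [Bool.and_eq_true, decide_eq_true_eq, max_le_iff]
    tauto

-- the two pumping loops agree: B's queue may carry extra non-positive quantities (A's
-- accidental `0 >= qq` read filters them out at push time), which B skips at pop time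
theorem pv_pump_eq {d : PySem.Dict String (PySem.Dict String Int)}
    {deadA deadB : PySem.Set String}
    (hdead : ∀ oc, PySem.Set.contains deadA oc = PySem.Set.contains deadB oc)
    (hnd : ∀ coin outs, d.get? coin = some outs → outs.keys.Nodup) :
    ∀ (fuel : Nat) (todoB : List (String × Int)) (best : PySem.Dict String Int),
      (∀ c, 0 ≤ best.getD c 0) →
      pumpA d deadA fuel (todoB.filter (fun p => decide (0 < p.2))) best
        = pumpB d deadB fuel todoB best := by
  intro fuel
  induction fuel with
  | zero => intro todoB best _; simp only [pumpA, pumpB]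
  | succ fuel ihf =>
    intro todoB
    induction todoB with
    | nil => intro best _; simp only [List.filter_nil, pumpA, pumpB]
    | cons p rest ihr =>
      intro best hinv
      obtain ⟨c, q⟩ := p
      by_cases hq : 0 < q
      · rw [List.filter_cons_of_pos (by simpa using hq)]
        by_cases hskip : best.getD c 0 ≥ q
        · simp only [pumpA, pumpB]
          rw [if_pos hskip, if_neg (not_lt.2 hskip)]
          exact ihr best hinv
        · have hlt : q > best.getD c 0 := lt_of_not_ge hskip
          simp only [pumpA, pumpB]
          rw [if_neg hskip, if_pos hlt]
          have hinv' : ∀ c', 0 ≤ (best.insert c q).getD c' 0 := by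
            intro c'
            rw [PySem.Dict.getD_insert]
            split
            · omega
            · exact hinv c'
          rcases hg : d.get? c with _ | outs
          · simp only [hg, PySem.Dict.getD_eq_get?_getD, Option.getD_none]
            show pumpA d deadA fuel (rest.filter (fun p => decide (0 < p.2))) (best.insert c q)
              = pumpB d deadB fuel rest (best.insert c q)
            exact ihf rest (best.insert c q) hinv'
          · simp only [hg, PySem.Dict.getD_eq_get?_getD, Option.getD_some]
            have hnodup := hnd c outs hg
            have hpush : outs.items.foldl (fun td p =>
                  if PySem.Set.contains deadA p.1 then td
                  else if 0 ≥ p.2 * q then td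
                  else td ++ [(p.1, p.2 * q)]) (rest.filter (fun p => decide (0 < p.2)))
                = rest.filter (fun p => decide (0 < p.2))
                  ++ (outs.items.filter (fun p =>
                        !(PySem.Set.contains deadA p.1) && decide (0 < p.2 * q))).map
                      (fun p => (p.1, p.2 * q)) := by
              have h1 := PySem.List.foldl_congr_mem outs.items
                  (fun (td : List (String × Int)) (p : String × Int) =>
                    if PySem.Set.contains deadA p.1 then td
                    else if 0 ≥ p.2 * q then td
                    else td ++ [(p.1, p.2 * q)])
                  (fun (td : List (String × Int)) (p : String × Int) =>
                    if (!(PySem.Set.contains deadA p.1) && decide (0 < p.2 * q))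
                    then td ++ [(p.1, p.2 * q)] else td)
                  (rest.filter (fun p => decide (0 < p.2)))
                  (fun acc x _ => by
                    dsimp only
                    split_ifs <;> simp_all
                    nlinarith)
              rw [h1]
              exact PySem.List.foldl_append_if _ _ _ _
            have hrel : (rest ++ (outs.items.filter (fun p =>
                    !(PySem.Set.contains deadB p.1))).map
                    (fun p => (p.1, p.2 * q))).filter (fun p => decide (0 < p.2))
                = rest.filter (fun p => decide (0 < p.2))
                  ++ (outs.items.filter (fun p =>
                        !(PySem.Set.contains deadA p.1) && decide (0 < p.2 * q))).map
                      (fun p => (p.1, p.2 * q)) := by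
              rw [List.filter_append]
              congr 1
              rw [List.filter_map, List.filter_filter]
              congr 1
              apply List.filter_congr
              intro x _
              dsimp only [Function.comp]
              rw [hdead x.1, Bool.and_comm]
            rcases hb : outs.get? "BTC" with _ | r
            · have hfind : outs.items.find? (fun p => p.1 == "BTC") = none := by
                simpa [PySem.Dict.get?] using hb
              have hnob : ∀ p ∈ outs.items, p.1 = "BTC" → ¬(1 < p.2 * q) := by
                intro p hp hpb _
                have := List.find?_eq_none.1 hfind p hp
                simp [hpb] at this
              simp only [pv_scan_inr _ _ _ _ hnob]
              rw [hpush, ← hrel]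
              exact ihf _ (best.insert c q) hinv'
            · have hfind : ∃ k, outs.items.find? (fun p => p.1 == "BTC") = some (k, r) := by
                simp only [PySem.Dict.get?] at hb
                rcases Option.map_eq_some_iff.1 hb with ⟨pr, hf, hpr⟩
                exact ⟨pr.1, by rw [hf]; cases pr; simp_all⟩
              by_cases hr1 : 1 < r * q
              · rcases hfind with ⟨k, hf⟩
                simp only [pv_scan_inl _ _ _ _ _ _ hf hr1]
                rw [if_pos hr1]
              · have hnob : ∀ p ∈ outs.items, p.1 = "BTC" → ¬(1 < p.2 * q) := by
                  intro p hp hpb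
                  have hgp : outs.get? p.1 = some p.2 :=
                    PySem.Dict.get?_of_mem_items _ hp hnodup
                  rw [hpb, hb] at hgp
                  have : p.2 = r := by simpa using hgp.symm
                  rw [this]
                  exact hr1
                simp only [pv_scan_inr _ _ _ _ hnob]
                rw [if_neg hr1, hpush, ← hrel]
                exact ihf _ (best.insert c q) hinv'
      · rw [List.filter_cons_of_neg (by simpa using hq)]
        have hnb : ¬(q > best.getD c 0) := by
          have := hinv c
          omega
        simp only [pumpB]
        rw [if_neg hnb]
        exact ihr best hinv

theorem solution_eq_alt (exchanges : List (String × List (String × Int))) :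
    solution exchanges = solution_alt exchanges := by
  have hn : (pvToDict exchanges).keys.Nodup := PySem.Dict.nodup_keys_ofList _
  simp only [solution, solution_alt]
  have htop : (pvToDict exchanges).values.foldl
        (fun t row => row.values.foldl (fun t q => max t q) t) 0
      = ((pvToDict exchanges).values.flatMap PySem.Dict.values).foldl (fun t q => max t q) 0 :=
    (List.foldl_flatMap ..).symm
  by_cases hall : ((pvToDict exchanges).values.flatMap PySem.Dict.values).all
      (fun q => decide (q ≤ 1)) = true
  · rw [if_pos hall, if_pos]
    rw [htop]
    exact (pv_foldl_max_le_one _ 0).2 ⟨by norm_num, hall⟩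
  · rw [if_neg hall, if_neg]
    · have hstart : [(("BTC" : String), (1 : Int))].filter (fun p => decide (0 < p.2))
          = [(("BTC" : String), (1 : Int))] := by decide
      have := pv_pump_eq (fun oc => pv_dead_eq hn oc) (pv_toDict_outs_nodup exchanges)
        (pvFuel exchanges) [("BTC", 1)] PySem.Dict.empty
        (fun c => by rw [PySem.Dict.getD_empty])
      rw [hstart] at this
      exact this
    · rw [htop]
      intro hle
      exact hall ((pv_foldl_max_le_one _ 0).1 hle).2

-- ===== VERDICT (by name: the statement is the Claim_ definition above) =====
theorem solution_spec : Claim_equal_solution := by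
  intro exchanges _
  unfold Spec_solution
  exact solution_eq_alt exchanges
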